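-- pv_equiv track=rewrite | github.com/gvanrossum/pyxl | pyxl/codec/tokenizer_invertible.py | try_fixing_indent
-- ===== SOURCE A (Python) =====
-- def try_fixing_indent(s, diff):
--     """Given a string, try to fix its internal indentation"""
--     if '\n' not in s:
--         return s
--     lines = s.split('\n')
--     if len(lines) < 2:
--         return s
--     fixed = [lines[0]]
--     spacing = " " * abs(diff)
--     for line in lines[1:]:
--         if diff > 0 and line:
--             line = spacing + line
--         elif diff < 0 and line.startswith(spacing):
--             line = line[len(spacing):]
--         fixed.append(line)
--
--     return '\n'.join(fixed)
-- ===== SOURCE B (Python) =====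
-- def try_fixing_indent(s, diff):
--     """Given a string, try to fix its internal indentation"""
--     # One forward character scan instead of split/loop/join: copy characters,
--     # and at each newline insert the pad (diff > 0) or skip one indent-width
--     # of spaces (diff < 0).
--     if diff == 0 or '\n' not in s:
--         return s
--     out = []
--     n = len(s)
--     pad = ' ' * abs(diff)
--     i = 0
--     while i < n:
--         c = s[i]
--         out.append(c)
--         i += 1
--         if c == '\n':
--             if diff > 0:
--                 if i < n and s[i] != '\n':
--                     out.append(pad)
--             elif s.startswith(pad, i):
--                 i += len(pad)
--     return ''.join(out)
-- ===== Notes on version B (the rewrite author's own statement) =====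
-- stated objective: alternative
-- what changed: Replaces A's split('\n') / per-line loop with list append / '\n'.join by a single forward character scan over the string that inserts the pad (diff > 0) or skips one indent-width of spaces (diff < 0) immediately after each newline, with early returns for diff == 0 or no newline.
import Mathlib
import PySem

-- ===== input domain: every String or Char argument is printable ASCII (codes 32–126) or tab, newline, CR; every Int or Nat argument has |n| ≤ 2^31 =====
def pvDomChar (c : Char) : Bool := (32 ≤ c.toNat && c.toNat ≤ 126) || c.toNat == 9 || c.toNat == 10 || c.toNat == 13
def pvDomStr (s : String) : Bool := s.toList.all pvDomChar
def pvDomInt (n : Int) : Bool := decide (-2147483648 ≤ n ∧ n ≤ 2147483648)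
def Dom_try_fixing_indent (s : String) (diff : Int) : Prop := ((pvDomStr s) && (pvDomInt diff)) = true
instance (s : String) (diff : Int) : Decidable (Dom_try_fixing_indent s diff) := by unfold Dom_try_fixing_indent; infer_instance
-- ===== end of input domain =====

-- B replaces A's split('\n')/per-line loop/'\n'.join with a single forward character scan
-- that pads or strips right after each newline (objective: alternative; same return value).

-- ===== PORT A =====
def try_fixing_indent (s : String) (diff : Int) : String :=
  if PySem.Str.isIn "\n" s = false then s          -- if '\n' not in s: return s
  else
    let lines := PySem.Chars.splitOn s.toList ['\n']   -- lines = s.split('\n')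
    if lines.length < 2 then s
    else
      let spacing := List.replicate diff.natAbs ' '    -- spacing = " " * abs(diff)
      let fixed := List.foldl (fun fixed line =>
          fixed ++ [if diff > 0 ∧ line ≠ [] then spacing ++ line
                    else if diff < 0 ∧ PySem.Chars.startswith line spacing then
                      List.drop spacing.length line    -- line[len(spacing):], nonneg start: drop is exact
                    else line])
        [lines.head!] lines.tail                        -- fixed = [lines[0]]; for line in lines[1:]
      String.ofList (PySem.Chars.join ['\n'] fixed)     -- '\n'.join(fixed)

-- ===== PORT B =====
-- the while loop of Source B as structural recursion over the remaining characters
def pvAltGo (pos : Bool) (k : Nat) (cs : List Char) : List Char :=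
  match cs with
  | [] => []
  | c :: rest =>
    if c = '\n' then
      '\n' ::
        (if pos then
          if rest ≠ [] ∧ rest.head? ≠ some '\n' then List.replicate k ' ' ++ pvAltGo pos k rest
          else pvAltGo pos k rest
        else
          if PySem.Chars.startswith rest (List.replicate k ' ') then pvAltGo pos k (rest.drop k)
          else pvAltGo pos k rest)
    else c :: pvAltGo pos k rest
termination_by cs.length
decreasing_by all_goals simp

def try_fixing_indent_alt (s : String) (diff : Int) : String :=
  if diff = 0 ∨ PySem.Str.isIn "\n" s = false then s
  else String.ofList (pvAltGo (decide (0 < diff)) diff.natAbs s.toList)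

-- ===== PRECONDITION & SPEC =====
def Spec_try_fixing_indent (s : String) (diff : Int) (out : String) : Prop := out = try_fixing_indent_alt s diff
instance (s : String) (diff : Int) (out : String) : Decidable (Spec_try_fixing_indent s diff out) := by unfold Spec_try_fixing_indent; infer_instance

-- ===== CLAIM (what is proved, stated in full; the proofs are below) =====
def Claim_equal_try_fixing_indent : Prop := ∀ (s : String) (diff : Int), Dom_try_fixing_indent s diff → Spec_try_fixing_indent s diff (try_fixing_indent s diff)

-- ===== LEMMAS AND PROOFS =====

-- the lines of cs as Python's cs.split('\n') produces them
def pvLines (cs : List Char) : List (List Char) :=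
  match cs with
  | [] => [[]]
  | c :: rest => if c = '\n' then [] :: pvLines rest else (pvLines rest).modifyHead (c :: ·)

-- the per-line transformation A applies to every line after the first
def pvF (pos : Bool) (k : Nat) (line : List Char) : List Char :=
  if pos ∧ line ≠ [] then List.replicate k ' ' ++ line
  else if ¬ pos ∧ PySem.Chars.startswith line (List.replicate k ' ') then line.drop k
  else line

theorem pvLines_ne_nil (cs : List Char) : pvLines cs ≠ [] := by
  match cs with
  | [] => simp [pvLines]
  | c :: rest =>
    simp only [pvLines]
    split
    · simp
    · have := pvLines_ne_nil rest
      cases h : pvLines rest <;> simp_all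

theorem pvGo_inv (fuel : Nat) : ∀ (l cur : List Char) (acc : List (List Char)), l.length < fuel →
    PySem.Chars.splitOn.go ['\n'] fuel l cur acc
      = acc.reverse ++ (pvLines l).modifyHead (cur.reverse ++ ·) := by
  induction fuel with
  | zero => intro l cur acc h; omega
  | succ fuel ih =>
    intro l cur acc h
    match l with
    | [] => simp [PySem.Chars.splitOn.go, pvLines]
    | c :: rest =>
      by_cases hc : c = '\n'
      · subst hc
        have hpre : List.isPrefixOf ['\n'] ('\n' :: rest) = true := by simp [List.isPrefixOf]
        simp only [PySem.Chars.splitOn.go, hpre, if_true]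
        rw [show List.drop ['\n'].length ('\n' :: rest) = rest by simp]
        rw [ih rest [] (cur.reverse :: acc) (by simp at h ⊢; omega)]
        simp only [pvLines]
        simp
        cases pvLines rest <;> simp [List.modifyHead]
      · have hpre : List.isPrefixOf ['\n'] (c :: rest) = false := by
          simp [List.isPrefixOf]; exact fun hx => (hc hx.symm).elim
        simp only [PySem.Chars.splitOn.go, hpre]
        rw [if_neg (by simp)]
        rw [ih rest (c :: cur) acc (by simp at h ⊢; omega)]
        simp only [pvLines, if_neg hc, List.modifyHead_modifyHead]
        congr 1
        cases pvLines rest <;> simp [List.modifyHead]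

theorem splitOn_eq_pvLines (cs : List Char) : PySem.Chars.splitOn cs ['\n'] = pvLines cs := by
  unfold PySem.Chars.splitOn
  rw [pvGo_inv (cs.length + 1) cs [] [] (by omega)]
  rcases h : pvLines cs with _ | ⟨a, b⟩ <;> simp [List.modifyHead]

theorem join_pvLines (cs : List Char) : PySem.Chars.join ['\n'] (pvLines cs) = cs := by
  match cs with
  | [] => simp [pvLines, PySem.Chars.join_singleton]
  | c :: rest =>
    have ihr := join_pvLines rest
    simp only [pvLines]
    by_cases hc : c = '\n'
    · subst hc
      rw [if_pos rfl]
      rcases h : pvLines rest with _ | ⟨m0, mt⟩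
      · exact absurd h (pvLines_ne_nil rest)
      · rw [h] at ihr
        rw [PySem.Chars.join_cons_cons, ihr]; simp
    · rw [if_neg hc]
      rcases h : pvLines rest with _ | ⟨m0, mt⟩
      · exact absurd h (pvLines_ne_nil rest)
      · rw [h] at ihr
        simp only [List.modifyHead]
        cases mt with
        | nil => rw [PySem.Chars.join_singleton] at ihr ⊢; rw [ihr]
        | cons y ys =>
          rw [PySem.Chars.join_cons_cons] at ihr ⊢
          rw [← ihr]; simp

theorem two_le_pvLines_of_mem (cs : List Char) (h : '\n' ∈ cs) : 2 ≤ (pvLines cs).length := by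
  match cs with
  | [] => simp at h
  | c :: rest =>
    simp only [pvLines]
    by_cases hc : c = '\n'
    · rw [if_pos hc]
      rcases hr : pvLines rest with _ | ⟨m0, mt⟩
      · exact absurd hr (pvLines_ne_nil rest)
      · simp
    · rw [if_neg hc]
      have hm : '\n' ∈ rest := by
        rcases List.mem_cons.mp h with h1 | h1
        · exact absurd h1.symm hc
        · exact h1
      have := two_le_pvLines_of_mem rest hm
      cases hr : pvLines rest <;> simp_all [List.modifyHead]

theorem pvLines_head_prefix (cs l0 : List Char) (t : List (List Char)) (h : pvLines cs = l0 :: t) :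
    l0 <+: cs := by
  match cs with
  | [] => simp [pvLines] at h; simp [h.1]
  | c :: rest =>
    simp only [pvLines] at h
    by_cases hc : c = '\n'
    · rw [if_pos hc] at h
      cases h; exact List.nil_prefix
    · rw [if_neg hc] at h
      rcases hr : pvLines rest with _ | ⟨m0, mt⟩
      · exact absurd hr (pvLines_ne_nil rest)
      · rw [hr] at h
        simp [List.modifyHead] at h
        obtain ⟨h1, h2⟩ := h
        have ih := pvLines_head_prefix rest m0 mt hr
        rw [← h1]
        exact List.cons_prefix_cons.mpr ⟨rfl, ih⟩

theorem pvLines_spaces_append (k : Nat) (cs : List Char) :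
    pvLines (List.replicate k ' ' ++ cs) = (pvLines cs).modifyHead (List.replicate k ' ' ++ ·) := by
  induction k with
  | zero =>
    cases h : pvLines cs <;> simp [List.modifyHead] <;> exact h
  | succ k ihk =>
    rw [List.replicate_succ, List.cons_append]
    simp only [pvLines]
    rw [if_neg (by decide), ihk, List.modifyHead_modifyHead]
    cases h : pvLines cs <;> simp [List.modifyHead]

theorem join_cons_append (sep p x : List Char) (xs : List (List Char)) :
    PySem.Chars.join sep ((p ++ x) :: xs) = p ++ PySem.Chars.join sep (x :: xs) := by
  cases xs with
  | nil => rw [PySem.Chars.join_singleton, PySem.Chars.join_singleton]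
  | cons y ys => rw [PySem.Chars.join_cons_cons, PySem.Chars.join_cons_cons]; simp

theorem pvF_nil (pos : Bool) (k : Nat) : pvF pos k [] = [] := by
  cases k <;> simp [pvF, PySem.Chars.startswith, List.replicate_succ]

theorem pvAltGo_join_aux (pos : Bool) (k : Nat) (n : Nat) :
    ∀ (cs l0 : List Char) (t : List (List Char)), cs.length = n → pvLines cs = l0 :: t →
    pvAltGo pos k cs = PySem.Chars.join ['\n'] (l0 :: t.map (pvF pos k)) := by
  induction n using Nat.strong_induction_on with
  | _ n ih =>
  intro cs l0 t hn h
  rcases cs with _ | ⟨c, rest⟩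
  ·
    simp [pvLines] at h
    obtain ⟨h1, h2⟩ := h
    subst h1; subst h2
    simp [pvAltGo, PySem.Chars.join_singleton]
  · by_cases hc : c = '\n'
    · subst hc
      rw [show pvLines ('\n' :: rest) = [] :: pvLines rest from by simp [pvLines]] at h
      injection h with h1 h2
      subst h1
      rcases hr : pvLines rest with _ | ⟨m0, mt⟩
      · exact absurd hr (pvLines_ne_nil rest)
      subst h2
      rw [hr, List.map_cons, PySem.Chars.join_cons_cons, List.nil_append]
      rw [pvAltGo, if_pos rfl]
      cases pos with
      | true =>
        rw [if_pos rfl]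
        rcases rest with _ | ⟨d, r⟩
        · rw [show pvLines ([] : List Char) = [[]] from by simp [pvLines]] at hr
          injection hr with hm1 hm2
          subst hm2
          simp [pvAltGo, ← hm1, pvF_nil, PySem.Chars.join_singleton]
        · by_cases hd : d = '\n'
          · subst hd
            have hr' := hr
            rw [show pvLines ('\n' :: r) = [] :: pvLines r from by simp [pvLines]] at hr'
            injection hr' with hm1 hm2
            have ih := ih ('\n' :: r).length (by simp at hn ⊢; omega) ('\n' :: r) m0 mt rfl hr
            rw [if_neg (show ¬(('\n' :: r) ≠ [] ∧ ('\n' :: r).head? ≠ some '\n') by simp)]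
            rw [ih, ← hm1, pvF_nil]
            rfl
          · have hr' := hr
            rw [show pvLines (d :: r) = (pvLines r).modifyHead (d :: ·) from by
              simp [pvLines, hd]] at hr'
            rcases hq : pvLines r with _ | ⟨q0, qt⟩
            · exact absurd hq (pvLines_ne_nil r)
            rw [hq] at hr'
            simp only [List.modifyHead] at hr'
            injection hr' with hm1 hm2
            have ih := ih (d :: r).length (by simp at hn ⊢; omega) (d :: r) m0 mt rfl hr
            rw [if_pos (show (d :: r) ≠ [] ∧ (d :: r).head? ≠ some '\n' from
              ⟨by simp, by simp [hd]⟩)]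
            rw [ih]
            have hne : m0 ≠ [] := by rw [← hm1]; simp
            rw [show pvF true k m0 = List.replicate k ' ' ++ m0 from by simp [pvF, hne]]
            rw [join_cons_append]
            rfl
      | false =>
        rw [if_neg (by simp)]
        by_cases hsw : PySem.Chars.startswith rest (List.replicate k ' ') = true
        · rw [if_pos hsw]
          obtain ⟨rest', hrest⟩ := (PySem.Chars.startswith_iff _ _).mp hsw
          subst hrest
          have hdropk : List.drop k (List.replicate k ' ' ++ rest') = rest' := by
            simp
          rw [hdropk]
          rw [pvLines_spaces_append] at hr
          rcases hq : pvLines rest' with _ | ⟨q0, qt⟩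
          · exact absurd hq (pvLines_ne_nil rest')
          rw [hq] at hr
          simp only [List.modifyHead] at hr
          injection hr with hm1 hm2
          subst hm2
          have ih := ih rest'.length (by simp at hn ⊢; omega) rest' q0 qt rfl hq
          rw [ih]
          have hsw0 : PySem.Chars.startswith m0 (List.replicate k ' ') = true := by
            rw [← hm1]; exact (PySem.Chars.startswith_iff _ _).mpr ⟨q0, rfl⟩
          rw [show pvF false k m0 = q0 from by
            rw [pvF, if_neg (by simp), if_pos (by simp [hsw0]), ← hm1]
            simp]
          rfl
        · rw [if_neg hsw]
          have ih := ih rest.length (by simp at hn ⊢; omega) rest m0 mt rfl hr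
          rw [ih]
          have hsw0 : ¬ PySem.Chars.startswith m0 (List.replicate k ' ') = true := by
            intro hsm
            apply hsw
            exact (PySem.Chars.startswith_iff _ _).mpr
              (((PySem.Chars.startswith_iff _ _).mp hsm).trans (pvLines_head_prefix rest m0 mt hr))
          rw [show pvF false k m0 = m0 from by simp [pvF, hsw0]]
          rfl
    · rw [show pvLines (c :: rest) = (pvLines rest).modifyHead (c :: ·) from by
        simp [pvLines, hc]] at h
      rcases hr : pvLines rest with _ | ⟨p0, pt⟩
      · exact absurd hr (pvLines_ne_nil rest)
      rw [hr] at h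
      simp only [List.modifyHead] at h
      injection h with h1 h2
      subst h1; subst h2
      have ih := ih rest.length (by simp at hn ⊢; omega) rest p0 pt rfl hr
      rw [pvAltGo, if_neg hc, ih]
      exact (join_cons_append ['\n'] [c] p0 (List.map (pvF pos k) pt)).symm

theorem pvAltGo_join (pos : Bool) (k : Nat) (cs l0 : List Char) (t : List (List Char))
    (h : pvLines cs = l0 :: t) :
    pvAltGo pos k cs = PySem.Chars.join ['\n'] (l0 :: t.map (pvF pos k)) :=
  pvAltGo_join_aux pos k cs.length cs l0 t rfl h

-- ===== VERDICT (by name: the statement is the Claim_ definition above) =====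
theorem pvF_eq_A (diff : Int) (hd0 : diff ≠ 0) (line : List Char) :
    (if diff > 0 ∧ line ≠ [] then List.replicate diff.natAbs ' ' ++ line
     else if diff < 0 ∧ PySem.Chars.startswith line (List.replicate diff.natAbs ' ') then
       List.drop (List.replicate diff.natAbs ' ').length line
     else line)
    = pvF (decide (0 < diff)) diff.natAbs line := by
  rcases lt_trichotomy diff 0 with hneg | hz | hpos
  · simp [pvF, hneg, show ¬ (0:Int) < diff by omega]
  · exact absurd hz hd0
  · simp [pvF, hpos, show ¬ diff < 0 by omega]

theorem try_fixing_indent_spec : Claim_equal_try_fixing_indent := by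
  intro s diff _
  unfold Spec_try_fixing_indent try_fixing_indent try_fixing_indent_alt
  by_cases hin : PySem.Str.isIn "\n" s = false
  · rw [if_pos hin, if_pos (Or.inr hin)]
  · have htrue : PySem.Str.isIn "\n" s = true := by
      cases hx : PySem.Str.isIn "\n" s
      · exact absurd hx hin
      · rfl
    rw [if_neg hin]
    have hmem : '\n' ∈ s.toList := by
      have hinf := (PySem.Str.isIn_iff_infix "\n" s).mp htrue
      have hnl : ("\n" : String).toList = ['\n'] := rfl
      rw [hnl] at hinf
      exact (List.singleton_infix_iff _ _).mp hinf
    have hsplit := splitOn_eq_pvLines s.toList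
    rcases hL : pvLines s.toList with _ | ⟨l0, t⟩
    · exact absurd hL (pvLines_ne_nil _)
    have h2 := two_le_pvLines_of_mem s.toList hmem
    rw [hL] at hsplit h2
    simp only [hsplit, List.head!_cons, List.tail_cons]
    rw [if_neg (by simp only [List.length_cons] at h2 ⊢; omega)]
    rw [PySem.List.foldl_append_singleton_eq_map]
    by_cases hd0 : diff = 0
    · rw [if_pos (Or.inl hd0)]
      subst hd0
      have hmap : List.map (fun line => if (0:Int) > 0 ∧ line ≠ [] then List.replicate (0:Int).natAbs ' ' ++ line
          else if (0:Int) < 0 ∧ PySem.Chars.startswith line (List.replicate (0:Int).natAbs ' ') then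
            List.drop (List.replicate (0:Int).natAbs ' ').length line
          else line) t = t := by
        have : ∀ line ∈ t, (if (0:Int) > 0 ∧ line ≠ [] then List.replicate (0:Int).natAbs ' ' ++ line
            else if (0:Int) < 0 ∧ PySem.Chars.startswith line (List.replicate (0:Int).natAbs ' ') then
              List.drop (List.replicate (0:Int).natAbs ' ').length line
            else line) = id line := by
          intro line _
          simp
        rw [List.map_congr_left this, List.map_id]
      rw [hmap]
      rw [show ([l0] ++ t) = l0 :: t from rfl, ← hL, join_pvLines, String.ofList_toList]
    · rw [if_neg (by
        intro hor
        rcases hor with h | h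
        · exact hd0 h
        · exact hin h)]
      rw [pvAltGo_join (decide (0 < diff)) diff.natAbs s.toList l0 t hL]
      have hmap := List.map_congr_left (fun line (_ : line ∈ t) => pvF_eq_A diff hd0 line)
      rw [hmap]
      rfl
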